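-- pv_equiv track=rewrite | github.com/azozello/swe | leetcode/2020/labeling_system.py | find_biggest_string
-- ===== SOURCE A (Python) =====
-- from queue import PriorityQueue
--
-- def find_biggest_string(label: str, limit: int):
--     char_map = {}
--
--     for s in label:
--         if char_map.get(s) is None:
--             char_map[s] = 1
--         else:
--             char_map[s] = char_map[s] + 1
--
--     char_queue = PriorityQueue()
--
--     for char, amount in char_map.items():
--         char_queue.put((-ord(char), amount))
--
--     result = ''
--     prev_char = 0
--
--     while not char_queue.empty():
--         inverted_char, count = char_queue.get()
--         if prev_char != inverted_char:
--             if count > limit: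
--                 result += chr(-inverted_char) * limit
--                 char_queue.put((inverted_char, count - limit))
--             else:
--                 result += chr(-inverted_char) * count
--             prev_char = inverted_char
--
--         else:
--             if not char_queue.empty():
--                 next_inverted_char, next_count = char_queue.get()
--                 result += chr(-next_inverted_char)
--                 prev_char = next_inverted_char
--
--                 if next_count > 1:
--                     char_queue.put((next_inverted_char, next_count - 1))
--
--                 char_queue.put((inverted_char, count))
--
--     return result
-- ===== SOURCE B (Python) =====
-- def find_biggest_string(label: str, limit: int):
--     counts_map = {}
--     for c in label:
--         counts_map[c] = counts_map.get(c, 0) + 1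
--     chars = sorted(counts_map, reverse=True)
--     counts = [counts_map[c] for c in chars]
--     n = len(chars)
--     out = []
--     i = 0
--     j = 1
--     while i < n:
--         take = min(counts[i], limit)
--         if take > 0:
--             out.append(chars[i] * take)
--             counts[i] -= take
--         if counts[i] == 0:
--             i += 1
--             while i < n and counts[i] == 0:
--                 i += 1
--         else:
--             if j <= i:
--                 j = i + 1
--             while j < n and counts[j] == 0:
--                 j += 1
--             if j >= n:
--                 break
--             out.append(chars[j])
--             counts[j] -= 1
--     return ''.join(out)
-- ===== Notes on version B (the rewrite author's own statement) =====
-- stated objective: alternative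
-- what changed: Replaces the PriorityQueue re-push greedy with a one-time descending frequency table walked by two index pointers (head pointer for the current largest character, separator pointer for the next smaller non-empty one), so no priority queue is maintained during the loop.
import Mathlib
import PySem

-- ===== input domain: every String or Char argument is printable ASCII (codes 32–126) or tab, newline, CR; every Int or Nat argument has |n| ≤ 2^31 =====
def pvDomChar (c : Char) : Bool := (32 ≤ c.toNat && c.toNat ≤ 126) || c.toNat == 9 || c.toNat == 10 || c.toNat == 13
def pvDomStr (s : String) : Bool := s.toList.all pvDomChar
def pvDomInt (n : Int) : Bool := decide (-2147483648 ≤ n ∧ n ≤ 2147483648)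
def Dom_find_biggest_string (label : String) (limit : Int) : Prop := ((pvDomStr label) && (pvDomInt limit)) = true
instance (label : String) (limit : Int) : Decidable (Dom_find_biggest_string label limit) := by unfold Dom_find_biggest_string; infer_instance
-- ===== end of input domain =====

set_option maxHeartbeats 1000000

-- B replaces A's PriorityQueue-driven greedy by a descending sorted count table walked with two
-- index pointers (objective: alternative; equal output proved on the stated domain Dom).

-- ===== PORT A =====
-- PriorityQueue.get = remove the lexicographically smallest tuple (exact: queue entries are distinct)
def pqMin (x : Int × Int) (xs : List (Int × Int)) : Int × Int :=
  xs.foldl (fun m y => if y.1 < m.1 ∨ (y.1 = m.1 ∧ y.2 < m.2) then y else m) x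

def pqPop (q : List (Int × Int)) : Option ((Int × Int) × List (Int × Int)) :=
  match q with
  | [] => none
  | x :: xs => some (pqMin x xs, q.erase (pqMin x xs))

-- chr(-h) * k  (Python: a non-positive repeat count yields the empty string)
def pvRep (h k : Int) : String := String.ofList (List.replicate k.toNat (Char.ofNat (-h).toNat))

-- the while-loop of A; the fuel argument is a totality guard only (a bound on the iteration count)
def loopA (limit : Int) : Nat → List (Int × Int) → Int → String → String
  | 0, _, _, acc => acc
  | fuel+1, q, prev, acc =>
    match pqPop q with
    | none => acc
    | some ((ic, cnt), q') =>
      if prev ≠ ic then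
        if cnt > limit then
          loopA limit fuel (q' ++ [(ic, cnt - limit)]) ic (acc ++ pvRep ic limit)
        else
          loopA limit fuel q' ic (acc ++ pvRep ic cnt)
      else
        match pqPop q' with
        | none => acc
        | some ((ic2, cnt2), q'') =>
          loopA limit fuel ((if cnt2 > 1 then q'' ++ [(ic2, cnt2 - 1)] else q'') ++ [(ic, cnt)])
            ic2 (acc ++ pvRep ic2 1)

def find_biggest_string (label : String) (limit : Int) : String :=
  let cs := label.toList
  let char_map := cs.foldl
    (fun d s => if (d.get? s).isNone then d.insert s 1 else d.insert s (d.getD s 0 + 1))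
    (PySem.Dict.empty : PySem.Dict Char Int)
  let char_queue := char_map.items.foldl (fun q p => q ++ [(-(p.1.toNat : Int), p.2)]) []
  let fuel := 2 * (char_queue.map (fun p => p.2.toNat)).sum + 2 * char_queue.length + 2
  loopA limit fuel char_queue 0 ""

-- ===== PORT B =====
-- while k < n and counts[k] == 0: k += 1
def skipZeros (counts : List Int) (n : Nat) (k : Nat) : Nat :=
  if h : k < n ∧ counts.getD k 0 = 0 then skipZeros counts n (k+1) else k
termination_by n - k
decreasing_by omega

-- the while-loop of B; the fuel argument is a totality guard only (a bound on the iteration count)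
def loopB (chars : List Char) (n : Nat) (limit : Int) :
    Nat → Nat → Nat → List Int → List String → List String
  | 0, _, _, _, out => out
  | fuel+1, i, j, counts, out =>
    if i < n then
      let take := min (counts.getD i 0) limit
      let counts' := if take > 0 then counts.set i (counts.getD i 0 - take) else counts
      let out' := if take > 0 then
          out ++ [String.ofList (List.replicate take.toNat (chars.getD i (Char.ofNat 0)))]
        else out
      if counts'.getD i 0 = 0 then
        loopB chars n limit fuel (skipZeros counts' n (i+1)) j counts' out'
      else
        let j2 := skipZeros counts' n (if j ≤ i then i + 1 else j)
        if n ≤ j2 then out'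
        else loopB chars n limit fuel i j2 (counts'.set j2 (counts'.getD j2 0 - 1))
               (out' ++ [String.ofList [chars.getD j2 (Char.ofNat 0)]])
    else out

def find_biggest_string_alt (label : String) (limit : Int) : String :=
  let cs := label.toList
  let counts_map := cs.foldl (fun d c => d.insert c (d.getD c 0 + 1))
    (PySem.Dict.empty : PySem.Dict Char Int)
  let chars := PySem.List.sorted counts_map.keys (fun c => c) true
  let counts := chars.map (fun c => counts_map.getD c 0)
  let fuel := 2 * (counts.map Int.toNat).sum + 2 * chars.length + 2
  PySem.Str.join "" (loopB chars chars.length limit fuel 0 1 counts [])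

-- ===== PRECONDITION & SPEC =====
def Spec_find_biggest_string (label : String) (limit : Int) (out : String) : Prop := out = find_biggest_string_alt label limit
instance (label : String) (limit : Int) (out : String) : Decidable (Spec_find_biggest_string label limit out) := by unfold Spec_find_biggest_string; infer_instance

-- ===== CLAIM (what is proved, stated in full; the proofs are below) =====
def Claim_equal_find_biggest_string : Prop := ∀ (label : String) (limit : Int), Dom_find_biggest_string label limit → Spec_find_biggest_string label limit (find_biggest_string label limit)

-- ===== LEMMAS AND PROOFS =====
-- Both loops are proved to compute the common reference greedy refLoop over the descending
-- (key, count) table; loopA via a permutation invariant on the queue, loopB via stateL, the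
-- live part of its count table.
def repC (h k : Int) : List Char := List.replicate k.toNat (Char.ofNat (-h).toNat)

def tailWt (l : List (Int × Int)) : Nat := ((l.drop 1).map (fun p => p.2.toNat)).sum

def muF (l : List (Int × Int)) (pb : Bool) : Nat :=
  2 * tailWt l + 2 * l.length + (if pb then 0 else 1)

lemma pvTailSumLe (l : List Nat) : l.tail.sum ≤ l.sum := by
  cases l <;> simp

def refLoop (limit : Int) : List (Int × Int) → Bool → List Char
  | [], _ => []
  | (h, c) :: rest, false =>
    if limit < c then repC h limit ++ refLoop limit ((h, c - limit) :: rest) true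
    else repC h c ++ refLoop limit rest false
  | [_], true => []
  | (h, c) :: (h2, c2) :: r2, true =>
    Char.ofNat (-h2).toNat ::
      refLoop limit ((h, c) :: (if 1 < c2 then (h2, c2 - 1) :: r2 else r2)) false
termination_by l pb => muF l pb
decreasing_by
  all_goals simp [muF, tailWt]
  all_goals try omega
  all_goals try (have := pvTailSumLe ((rest.map (fun p => p.2.toNat))); omega)
  all_goals split_ifs <;> simp_all <;> omega

lemma refLoop_nil (limit : Int) (pb : Bool) : refLoop limit [] pb = [] := by
  rw [refLoop]

lemma refLoop_false (limit h c : Int) (rest : List (Int × Int)) :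
    refLoop limit ((h, c) :: rest) false =
      if limit < c then repC h limit ++ refLoop limit ((h, c - limit) :: rest) true
      else repC h c ++ refLoop limit rest false := by
  rw [refLoop]

lemma refLoop_true_nil (limit h c : Int) : refLoop limit [(h, c)] true = [] := by
  rw [refLoop]

lemma refLoop_true_cons (limit h c h2 c2 : Int) (r2 : List (Int × Int)) :
    refLoop limit ((h, c) :: (h2, c2) :: r2) true =
      Char.ofNat (-h2).toNat ::
        refLoop limit ((h, c) :: (if 1 < c2 then (h2, c2 - 1) :: r2 else r2)) false := by
  conv_lhs => rw [refLoop]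

def pbOf (l : List (Int × Int)) (prev : Int) : Bool :=
  match l with
  | [] => false
  | x :: _ => decide (prev = x.1)

def lexLe (a b : Int × Int) : Prop := a.1 < b.1 ∨ (a.1 = b.1 ∧ a.2 ≤ b.2)

lemma lexLe_trans {a b c : Int × Int} (h1 : lexLe a b) (h2 : lexLe b c) : lexLe a c := by
  unfold lexLe at *; omega

lemma pqMin_step (x z : Int × Int) (zs : List (Int × Int)) :
    pqMin x (z :: zs) = pqMin (if z.1 < x.1 ∨ (z.1 = x.1 ∧ z.2 < x.2) then z else x) zs := by
  simp [pqMin]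

lemma pqMin_mem (x : Int × Int) (xs : List (Int × Int)) : pqMin x xs ∈ x :: xs := by
  induction xs generalizing x with
  | nil => simp [pqMin]
  | cons z zs ih =>
    rw [pqMin_step]
    have := ih (if z.1 < x.1 ∨ (z.1 = x.1 ∧ z.2 < x.2) then z else x)
    rw [List.mem_cons] at this
    rcases this with h | h
    · rw [h]; split_ifs <;> simp
    · simp [h]

lemma pqMin_le (x : Int × Int) (xs : List (Int × Int)) :
    ∀ y ∈ x :: xs, lexLe (pqMin x xs) y := by
  induction xs generalizing x with
  | nil => intro y hy; simp at hy; subst hy; simp [pqMin, lexLe]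
  | cons z zs ih =>
    intro y hy
    rw [pqMin_step]
    set x' := if z.1 < x.1 ∨ (z.1 = x.1 ∧ z.2 < x.2) then z else x with hx'
    have hx'x : lexLe x' x := by unfold lexLe; rw [hx']; split_ifs <;> omega
    have hx'z : lexLe x' z := by unfold lexLe; rw [hx']; split_ifs <;> omega
    have hhead := ih x' x' (by simp)
    simp only [List.mem_cons] at hy
    rcases hy with rfl | rfl | hy
    · exact lexLe_trans hhead hx'x
    · exact lexLe_trans hhead hx'z
    · exact ih x' y (by simp [hy])

lemma pqPop_sorted (q rest : List (Int × Int)) (h c : Int)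
    (hq : q.Perm ((h, c) :: rest)) (hs : ((h, c) :: rest).Pairwise (fun a b => a.1 < b.1)) :
    ∃ q', pqPop q = some ((h, c), q') ∧ q'.Perm rest := by
  match q, hq with
  | [], hq => exact absurd (hq.length_eq) (by simp)
  | x :: xs, hq =>
    have hmem : pqMin x xs ∈ (h, c) :: rest := hq.mem_iff.mp (pqMin_mem x xs)
    have hhc : (h, c) ∈ x :: xs := hq.mem_iff.mpr (by simp)
    have hle := pqMin_le x xs (h, c) hhc
    have hmeq : pqMin x xs = (h, c) := by
      rw [List.mem_cons] at hmem
      rcases hmem with h1 | h1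
      · exact h1
      · exfalso
        have := (List.pairwise_cons.mp hs).1 _ h1
        unfold lexLe at hle
        simp at this hle
        omega
    refine ⟨(x :: xs).erase (pqMin x xs), by simp [pqPop, hmeq], ?_⟩
    rw [hmeq]
    have := hq.erase (h, c)
    simpa using this

lemma refIrrel (limit : Int) (hlim : limit ≤ 0) :
    ∀ (N : Nat) (rest : List (Int × Int)) (pb : Bool) (h c c' : Int),
      muF ((h, c) :: rest) pb ≤ N → limit < c → limit < c' →
      refLoop limit ((h, c) :: rest) pb = refLoop limit ((h, c') :: rest) pb := by
  intro N
  induction N with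
  | zero => intro rest pb h c c' hmu _ _; simp [muF] at hmu
  | succ N ih =>
    intro rest pb h c c' hmu hc hc'
    cases pb with
    | false =>
      rw [refLoop_false, refLoop_false, if_pos hc, if_pos hc']
      congr 1
      exact ih rest true h (c - limit) (c' - limit)
        (by simp [muF, tailWt] at hmu ⊢; omega) (by omega) (by omega)
    | true =>
      match rest with
      | [] => rw [refLoop_true_nil, refLoop_true_nil]
      | (h2, c2) :: r2 =>
        rw [refLoop_true_cons, refLoop_true_cons]
        congr 1
        refine ih _ false h c c' ?_ hc hc'
        simp [muF, tailWt] at hmu ⊢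
        split_ifs <;> simp_all <;> omega

lemma tailWt_le (x : Int × Int) (rest : List (Int × Int)) : tailWt rest ≤ tailWt (x :: rest) := by
  cases rest <;> simp [tailWt]

lemma tailWt_le_sum (l : List (Int × Int)) : tailWt l ≤ (l.map (fun p => p.2.toNat)).sum := by
  cases l <;> simp [tailWt]

lemma toList_pvRep (h k : Int) : (pvRep h k).toList = repC h k := by
  simp [pvRep, repC]

lemma loopA_eq (limit : Int) : ∀ (fuel : Nat) (l q : List (Int × Int)) (prev : Int) (acc : String),
    q.Perm l → l.Pairwise (fun a b => a.1 < b.1) → (∀ x ∈ l, 1 ≤ x.2) →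
    muF l (pbOf l prev) + 1 ≤ fuel →
    (loopA limit fuel q prev acc).toList = acc.toList ++ refLoop limit l (pbOf l prev) := by
  intro fuel
  induction fuel with
  | zero => intro l q prev acc _ _ _ hmu; omega
  | succ fuel ih =>
    intro l q prev acc hperm hsort hpos hmu
    match l, hperm, hsort, hpos, hmu with
    | [], hperm, _, _, _ =>
      have hq : q = [] := hperm.eq_nil
      subst hq
      simp [loopA, pqPop, refLoop, pbOf]
    | (h, c) :: rest, hperm, hsort, hpos, hmu =>
      obtain ⟨q', hpop, hq'⟩ := pqPop_sorted q rest h c hperm hsort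
      have hkeys := (List.pairwise_cons.mp hsort).1
      have htail := (List.pairwise_cons.mp hsort).2
      by_cases hph : prev = h
      · -- previous char is the head: pop a separator
        have hpb : pbOf ((h, c) :: rest) prev = true := by simp [pbOf, hph]
        rw [hpb] at hmu ⊢
        match rest, hq', htail, hmu with
        | [], hq', _, _ =>
          have : q' = [] := hq'.eq_nil
          subst this
          simp only [loopA, hpop]
          rw [if_neg (by simp [hph]), refLoop_true_nil]
          simp [pqPop]
        | (h2, c2) :: r2, hq', htail, hmu =>
          obtain ⟨q'', hpop2, hq''⟩ := pqPop_sorted q' r2 h2 c2 hq' htail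
          have hh2 : h < h2 := hkeys (h2, c2) (by simp)
          simp only [loopA, hpop, hpop2]
          rw [if_neg (by simp [hph]), refLoop_true_cons]
          -- the recursive state
          set rest' := (if 1 < c2 then (h2, c2 - 1) :: r2 else r2) with hrest'
          have hq3 : ((if c2 > 1 then q'' ++ [(h2, c2 - 1)] else q'') ++ [(h, c)]).Perm
              ((h, c) :: rest') := by
            refine (List.perm_append_singleton _ _).trans (List.Perm.cons _ ?_)
            rw [hrest']
            split_ifs
            · exact (List.perm_append_singleton _ _).trans (List.Perm.cons _ hq'')
            · exact hq''
          have hsort' : ((h, c) :: rest').Pairwise (fun a b => a.1 < b.1) := by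
            rw [hrest']
            split_ifs
            · refine List.pairwise_cons.mpr ⟨?_, ?_⟩
              · intro y hy
                rcases List.mem_cons.mp hy with rfl | hy
                · exact hh2
                · exact hkeys y (by simp [hy])
              · refine List.pairwise_cons.mpr ⟨?_, (List.pairwise_cons.mp htail).2⟩
                exact fun y hy => (List.pairwise_cons.mp htail).1 y hy
            · exact hsort.sublist (by simp [List.Sublist.cons₂, List.sublist_cons_self])
          have hpos' : ∀ x ∈ (h, c) :: rest', 1 ≤ x.2 := by
            intro x hx
            rcases List.mem_cons.mp hx with rfl | hx
            · exact hpos _ (by simp)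
            · rw [hrest'] at hx
              split_ifs at hx
              · rcases List.mem_cons.mp hx with rfl | hx
                · have := hpos (h2, c2) (by simp); simp at this ⊢; omega
                · exact hpos x (by simp [hx])
              · exact hpos x (by simp [hx])
          have hpb' : pbOf ((h, c) :: rest') h2 = false := by
            simp [pbOf]; omega
          have hmu' : muF ((h, c) :: rest') (pbOf ((h, c) :: rest') h2) + 1 ≤ fuel := by
            rw [hpb']
            rw [hrest']
            simp [muF, tailWt] at hmu ⊢
            split_ifs <;> simp_all <;> omega
          rw [ih ((h, c) :: rest') _ h2 (acc ++ pvRep h2 1) hq3 hsort' hpos' hmu']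
          rw [hpb']
          simp [toList_pvRep, repC]
      · -- previous char differs from the head
        have hpb : pbOf ((h, c) :: rest) prev = false := by simp [pbOf, hph]
        rw [hpb] at hmu ⊢
        rw [refLoop_false]
        simp only [loopA, hpop]
        rw [if_pos hph]
        by_cases hcl : c > limit
        · rw [if_pos hcl, if_pos (by omega : limit < c)]
          have hq3 : (q' ++ [(h, c - limit)]).Perm ((h, c - limit) :: rest) :=
            (List.perm_append_singleton _ _).trans (List.Perm.cons _ hq')
          have hsort' : ((h, c - limit) :: rest).Pairwise (fun a b => a.1 < b.1) :=
            List.pairwise_cons.mpr ⟨fun y hy => hkeys y hy, htail⟩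
          have hpos' : ∀ x ∈ (h, c - limit) :: rest, 1 ≤ x.2 := by
            intro x hx
            rcases List.mem_cons.mp hx with rfl | hx
            · simp; omega
            · exact hpos x (by simp [hx])
          have hpb' : pbOf ((h, c - limit) :: rest) h = true := by simp [pbOf]
          have hmu' : muF ((h, c - limit) :: rest) (pbOf ((h, c - limit) :: rest) h) + 1 ≤ fuel := by
            rw [hpb']
            simp [muF, tailWt] at hmu ⊢
            omega
          rw [ih ((h, c - limit) :: rest) _ h (acc ++ pvRep h limit) hq3 hsort' hpos' hmu', hpb']
          simp [toList_pvRep, repC]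
        · rw [if_neg hcl, if_neg (by omega : ¬ limit < c)]
          have hpb' : pbOf rest h = false := by
            match rest, hkeys with
            | [], _ => rfl
            | y :: t, hkeys =>
              have := hkeys y (by simp)
              simp [pbOf]
              omega
          have hmu' : muF rest (pbOf rest h) + 1 ≤ fuel := by
            rw [hpb']
            have := tailWt_le (h, c) rest
            simp [muF] at hmu ⊢
            omega
          rw [ih rest _ h (acc ++ pvRep h c) hq' htail (fun x hx => hpos x (by simp [hx])) hmu', hpb']
          simp [toList_pvRep, repC]

lemma skipZeros_ge (counts : List Int) (n : Nat) : ∀ k, k ≤ skipZeros counts n k := by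
  intro k
  induction hn : n - k generalizing k with
  | zero => rw [skipZeros]; split_ifs <;> omega
  | succ m ih =>
    rw [skipZeros]
    split_ifs with h
    · exact le_trans (by omega) (ih (k+1) (by omega))
    · omega

lemma skipZeros_zero (counts : List Int) (n : Nat) :
    ∀ k m, k ≤ m → m < skipZeros counts n k → counts.getD m 0 = 0 := by
  intro k
  induction hn : n - k generalizing k with
  | zero =>
    intro m h1 h2
    rw [skipZeros] at h2; split_ifs at h2 <;> omega
  | succ mm ih =>
    intro m h1 h2
    rw [skipZeros] at h2
    split_ifs at h2 with h
    · rcases Nat.eq_or_lt_of_le h1 with rfl | hlt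
      · exact h.2
      · exact ih (k+1) (by omega) m hlt h2
    · omega

lemma skipZeros_stop2 (counts : List Int) (n : Nat) :
    ∀ k, skipZeros counts n k < n → counts.getD (skipZeros counts n k) 0 ≠ 0 := by
  intro k
  induction hn : n - k generalizing k with
  | zero =>
    intro h
    rw [skipZeros] at h ⊢
    split_ifs at h ⊢ with h2
    · exact absurd h2.1 (by omega)
    · exact fun hc => h2 ⟨h, hc⟩
  | succ m ih =>
    intro h
    rw [skipZeros] at h ⊢
    split_ifs at h ⊢ with h2
    · exact ih (k+1) (by omega) h
    · exact fun hc => h2 ⟨h, hc⟩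

def stateL (chars : List Char) (counts : List Int) (i : Nat) : List (Int × Int) :=
  if i < chars.length then
    (if 0 < counts.getD i 0 then
      [((-((chars.getD i (Char.ofNat 0)).toNat : Int)), counts.getD i 0)] else [])
      ++ stateL chars counts (i+1)
  else []
termination_by chars.length - i
decreasing_by omega

lemma stateL_nil (chars : List Char) (counts : List Int) (i : Nat) (hi : chars.length ≤ i) :
    stateL chars counts i = [] := by
  rw [stateL]; split_ifs <;> first | rfl | omega

lemma stateL_cons (chars : List Char) (counts : List Int) (i : Nat) (hi : i < chars.length)
    (hpos : 0 < counts.getD i 0) :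
    stateL chars counts i =
      ((-((chars.getD i (Char.ofNat 0)).toNat : Int)), counts.getD i 0) :: stateL chars counts (i+1) := by
  rw [stateL, if_pos hi, if_pos hpos]
  rfl

lemma stateL_skip (chars : List Char) (counts : List Int) (i : Nat) (hi : i < chars.length)
    (hz : counts.getD i 0 ≤ 0) :
    stateL chars counts i = stateL chars counts (i+1) := by
  rw [stateL, if_pos hi, if_neg (by omega)]
  rfl

lemma stateL_congr (chars : List Char) (counts counts2 : List Int) :
    ∀ i, (∀ k, i ≤ k → counts.getD k 0 = counts2.getD k 0) →
    stateL chars counts i = stateL chars counts2 i := by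
  intro i
  induction hn : chars.length - i generalizing i with
  | zero =>
    intro h
    rw [stateL_nil chars counts i (by omega), stateL_nil chars counts2 i (by omega)]
  | succ m ih =>
    intro h
    have hk := h i le_rfl
    have h1 : i < chars.length := by omega
    have ihr := ih (i+1) (by omega) (fun k hk2 => h k (by omega))
    by_cases h2 : 0 < counts.getD i 0
    · rw [stateL_cons chars counts i h1 h2, stateL_cons chars counts2 i h1 (hk ▸ h2), hk, ihr]
    · rw [stateL_skip chars counts i h1 (by omega), stateL_skip chars counts2 i h1 (by omega), ihr]

lemma stateL_eq_of_zeros (chars : List Char) (counts : List Int) :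
    ∀ a b, a ≤ b → (∀ k, a ≤ k → k < b → counts.getD k 0 = 0) →
    stateL chars counts a = stateL chars counts b := by
  intro a b
  induction hn : b - a generalizing a with
  | zero => intro h _; have : a = b := by omega
            rw [this]
  | succ m ih =>
    intro hab hz
    by_cases ha : a < chars.length
    · rw [stateL_skip chars counts a ha (by rw [hz a le_rfl (by omega)])]
      exact ih (a+1) (by omega) (by omega) (fun k h1 h2 => hz k (by omega) h2)
    · rw [stateL_nil chars counts a (by omega), stateL_nil chars counts b (by omega)]

lemma getD_set_self (counts : List Int) (m : Nat) (v : Int) (hm : m < counts.length) :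
    (counts.set m v).getD m 0 = v := by
  simp [List.getD, List.getElem?_set, hm]

lemma getD_set_ne (counts : List Int) (m k : Nat) (v : Int) (hmk : m ≠ k) :
    (counts.set m v).getD k 0 = counts.getD k 0 := by
  simp [List.getD, List.getElem?_set, hmk]

lemma loopB_eq (chars : List Char) (limit : Int) :
    ∀ (fuel i j : Nat) (counts : List Int) (out : List String),
    counts.length = chars.length →
    (∀ k, i ≤ k → 0 ≤ counts.getD k 0) →
    (i < chars.length → 1 ≤ counts.getD i 0) →
    (∀ k, i < k → k < j → counts.getD k 0 = 0) →
    muF (stateL chars counts i) false + 1 ≤ fuel →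
    ((loopB chars chars.length limit fuel i j counts out).map String.toList).flatten
      = (out.map String.toList).flatten ++ refLoop limit (stateL chars counts i) false := by
  intro fuel
  induction fuel with
  | zero => intro i j counts out _ _ _ _ hmu; omega
  | succ fuel ih =>
    intro i j counts out hlen hnn hpos h4 hmu
    by_cases hi : i < chars.length
    case neg =>
      simp only [loopB]
      rw [if_neg hi, stateL_nil chars counts i (by omega), refLoop_nil]
      simp
    case pos =>
      have hci : 1 ≤ counts.getD i 0 := hpos hi
      have hkey := stateL_cons chars counts i hi (by omega)
      rw [hkey] at hmu ⊢
      rw [refLoop_false]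
      by_cases hcl : limit < counts.getD i 0
      · -- head keeps a remainder after take = limit copies: separator needed
        rw [if_pos hcl]
        have hmin : min (counts.getD i 0) limit = limit := min_eq_right (le_of_lt hcl)
        simp only [loopB]
        rw [if_pos hi, hmin]
        by_cases hlp : limit > 0
        · -- positive limit: append limit copies, then one separator char
          simp only [if_pos hlp]
          rw [getD_set_self counts i _ (by omega), if_neg (show ¬ (counts.getD i 0 - limit = 0) from by omega)]
          set C' := counts.set i (counts.getD i 0 - limit) with hC'
          set j1 := if j ≤ i then i + 1 else j with hj1
          set j2 := skipZeros C' chars.length j1 with hj2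
          have hj1i : i < j1 := by rw [hj1]; split_ifs <;> omega
          have hj2j1 : j1 ≤ j2 := skipZeros_ge _ _ _
          have hzz : ∀ k, i < k → k < j2 → C'.getD k 0 = 0 := by
            intro k hk1 hk2
            by_cases hkj1 : k < j1
            · rw [hC', getD_set_ne counts i k _ (by omega)]
              refine h4 k hk1 ?_
              rw [hj1] at hkj1; split_ifs at hkj1 <;> omega
            · exact skipZeros_zero C' chars.length j1 k (by omega) hk2
          have hcongr : stateL chars C' (i+1) = stateL chars counts (i+1) :=
            stateL_congr chars _ counts (i+1)
              (fun k hk => by rw [hC', getD_set_ne counts i k _ (by omega)])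
          have hrest : stateL chars C' (i+1) = stateL chars C' j2 :=
            stateL_eq_of_zeros chars C' (i+1) j2 (by omega) (fun k h1 h2 => hzz k (by omega) h2)
          by_cases hj2n : chars.length ≤ j2
          · rw [if_pos hj2n]
            rw [show stateL chars counts (i+1) = [] from by
              rw [← hcongr, hrest, stateL_nil _ _ _ hj2n]]
            rw [refLoop_true_nil]
            simp [repC, Char.ofNat_toNat]
          · rw [if_neg hj2n]
            have hj2lt : j2 < chars.length := by omega
            have hc2ne : C'.getD j2 0 ≠ 0 := by
              have := skipZeros_stop2 C' chars.length j1 (by rw [← hj2]; exact hj2lt)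
              rwa [← hj2] at this
            have hc2nn : 0 ≤ C'.getD j2 0 := by
              rw [hC', getD_set_ne counts i j2 _ (by omega)]
              exact hnn j2 (by omega)
            have hc2pos : 1 ≤ C'.getD j2 0 := by omega
            have hconsj2 := stateL_cons chars C' j2 hj2lt (by omega)
            rw [show stateL chars counts (i+1) =
                ((-(((chars.getD j2 (Char.ofNat 0)).toNat : Int))), C'.getD j2 0) :: stateL chars C' (j2+1) from by
              rw [← hcongr, hrest, hconsj2]]
            rw [refLoop_true_cons]
            have hC''i : (C'.set j2 (C'.getD j2 0 - 1)).getD i 0 = counts.getD i 0 - limit := by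
              rw [getD_set_ne C' j2 i _ (by omega), hC', getD_set_self counts i _ (by omega)]
            have hC''tail : stateL chars (C'.set j2 (C'.getD j2 0 - 1)) (j2+1) = stateL chars C' (j2+1) :=
              stateL_congr chars _ C' (j2+1)
                (fun k hk => getD_set_ne C' j2 k _ (by omega))
            have hstate'' : stateL chars (C'.set j2 (C'.getD j2 0 - 1)) i =
                ((-(((chars.getD i (Char.ofNat 0)).toNat : Int))), counts.getD i 0 - limit) ::
                (if 1 < C'.getD j2 0 then
                  ((-(((chars.getD j2 (Char.ofNat 0)).toNat : Int))), C'.getD j2 0 - 1) :: stateL chars C' (j2+1)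
                 else stateL chars C' (j2+1)) := by
              rw [stateL_cons chars _ i hi (by rw [hC''i]; omega), hC''i]
              congr 1
              rw [stateL_eq_of_zeros chars _ (i+1) j2 (by omega)
                (fun k h1 h2 => by rw [getD_set_ne C' j2 k _ (by omega)]; exact hzz k (by omega) h2)]
              by_cases hc21 : 1 < C'.getD j2 0
              · rw [if_pos hc21, stateL_cons chars _ j2 hj2lt
                  (by rw [getD_set_self C' j2 _ (by simp [hC', hlen]; omega)]; omega),
                  getD_set_self C' j2 _ (by simp [hC', hlen]; omega), hC''tail]
              · rw [if_neg hc21, stateL_skip chars _ j2 hj2lt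
                  (by rw [getD_set_self C' j2 _ (by simp [hC', hlen]; omega)]; omega), hC''tail]
            rw [ih i j2 (C'.set j2 (C'.getD j2 0 - 1)) _ (by simp [hC', hlen]) ?hnn ?hpos ?h4 ?hmu]
            case hnn =>
              intro k hk
              by_cases hkj2 : k = j2
              · rw [hkj2, getD_set_self C' j2 _ (by simp [hC', hlen]; omega)]; omega
              · rw [getD_set_ne C' j2 k _ (by omega)]
                by_cases hki : k = i
                · rw [hki, hC', getD_set_self counts i _ (by omega)]; omega
                · rw [hC', getD_set_ne counts i k _ (by omega)]
                  exact hnn k hk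
            case hpos =>
              intro _
              rw [hC''i]; omega
            case h4 =>
              intro k hk1 hk2
              rw [getD_set_ne C' j2 k _ (by omega)]
              exact hzz k hk1 hk2
            case hmu =>
              rw [hstate'']
              rw [show stateL chars counts (i+1) =
                  ((-(((chars.getD j2 (Char.ofNat 0)).toNat : Int))), C'.getD j2 0) :: stateL chars C' (j2+1) from by
                rw [← hcongr, hrest, hconsj2]] at hmu
              by_cases hc21 : 1 < C'.getD j2 0
              · rw [if_pos hc21]
                simp only [muF, tailWt, List.length_cons, List.drop_one, List.tail_cons,
                  List.map_cons, List.sum_cons] at hmu ⊢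
                omega
              · rw [if_neg hc21]
                simp only [muF, tailWt, List.length_cons, List.drop_one, List.tail_cons,
                  List.map_cons, List.sum_cons] at hmu ⊢
                omega
            rw [hstate'']
            simp [repC, Char.ofNat_toNat, List.append_assoc]
        · -- non-positive limit: nothing is appended for the head, a separator is still consumed
          simp only [if_neg hlp]
          rw [if_neg (show ¬ (counts.getD i 0 = 0) from by omega)]
          set j1 := if j ≤ i then i + 1 else j with hj1
          set j2 := skipZeros counts chars.length j1 with hj2
          have hj1i : i < j1 := by rw [hj1]; split_ifs <;> omega
          have hj2j1 : j1 ≤ j2 := skipZeros_ge _ _ _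
          have hzz : ∀ k, i < k → k < j2 → counts.getD k 0 = 0 := by
            intro k hk1 hk2
            by_cases hkj1 : k < j1
            · refine h4 k hk1 ?_
              rw [hj1] at hkj1; split_ifs at hkj1 <;> omega
            · exact skipZeros_zero counts chars.length j1 k (by omega) hk2
          have hrest : stateL chars counts (i+1) = stateL chars counts j2 :=
            stateL_eq_of_zeros chars counts (i+1) j2 (by omega) (fun k h1 h2 => hzz k (by omega) h2)
          have hlimnp : limit ≤ 0 := by omega
          by_cases hj2n : chars.length ≤ j2
          · rw [if_pos hj2n]
            rw [show stateL chars counts (i+1) = [] from by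
              rw [hrest, stateL_nil _ _ _ hj2n]]
            rw [refLoop_true_nil]
            simp [repC, Int.toNat_of_nonpos hlimnp]
          · rw [if_neg hj2n]
            have hj2lt : j2 < chars.length := by omega
            have hc2ne : counts.getD j2 0 ≠ 0 := by
              have := skipZeros_stop2 counts chars.length j1 (by rw [← hj2]; exact hj2lt)
              rwa [← hj2] at this
            have hc2nn : 0 ≤ counts.getD j2 0 := hnn j2 (by omega)
            have hc2pos : 1 ≤ counts.getD j2 0 := by omega
            have hconsj2 := stateL_cons chars counts j2 hj2lt (by omega)
            rw [show stateL chars counts (i+1) =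
                ((-(((chars.getD j2 (Char.ofNat 0)).toNat : Int))), counts.getD j2 0) :: stateL chars counts (j2+1) from by
              rw [hrest, hconsj2]]
            rw [refLoop_true_cons]
            rw [refIrrel limit hlimnp
              (muF ((-(((chars.getD i (Char.ofNat 0)).toNat : Int)), counts.getD i 0 - limit) ::
                (if 1 < counts.getD j2 0 then
                  ((-(((chars.getD j2 (Char.ofNat 0)).toNat : Int)), counts.getD j2 0 - 1) :: stateL chars counts (j2+1))
                 else stateL chars counts (j2+1))) false)
              _ false (-(((chars.getD i (Char.ofNat 0)).toNat : Int)))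
              (counts.getD i 0 - limit) (counts.getD i 0) le_rfl (by omega) (by omega)]
            have hC''i : (counts.set j2 (counts.getD j2 0 - 1)).getD i 0 = counts.getD i 0 :=
              getD_set_ne counts j2 i _ (by omega)
            have hC''tail : stateL chars (counts.set j2 (counts.getD j2 0 - 1)) (j2+1) = stateL chars counts (j2+1) :=
              stateL_congr chars _ counts (j2+1)
                (fun k hk => getD_set_ne counts j2 k _ (by omega))
            have hstate'' : stateL chars (counts.set j2 (counts.getD j2 0 - 1)) i =
                ((-(((chars.getD i (Char.ofNat 0)).toNat : Int))), counts.getD i 0) ::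
                (if 1 < counts.getD j2 0 then
                  ((-(((chars.getD j2 (Char.ofNat 0)).toNat : Int))), counts.getD j2 0 - 1) :: stateL chars counts (j2+1)
                 else stateL chars counts (j2+1)) := by
              rw [stateL_cons chars _ i hi (by rw [hC''i]; omega), hC''i]
              congr 1
              rw [stateL_eq_of_zeros chars _ (i+1) j2 (by omega)
                (fun k h1 h2 => by rw [getD_set_ne counts j2 k _ (by omega)]; exact hzz k (by omega) h2)]
              by_cases hc21 : 1 < counts.getD j2 0
              · rw [if_pos hc21, stateL_cons chars _ j2 hj2lt
                  (by rw [getD_set_self counts j2 _ (by omega)]; omega),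
                  getD_set_self counts j2 _ (by omega), hC''tail]
              · rw [if_neg hc21, stateL_skip chars _ j2 hj2lt
                  (by rw [getD_set_self counts j2 _ (by omega)]; omega), hC''tail]
            rw [ih i j2 (counts.set j2 (counts.getD j2 0 - 1)) _ (by simp [hlen]) ?hnn ?hpos ?h4 ?hmu]
            case hnn =>
              intro k hk
              by_cases hkj2 : k = j2
              · rw [hkj2, getD_set_self counts j2 _ (by omega)]; omega
              · rw [getD_set_ne counts j2 k _ (by omega)]
                exact hnn k hk
            case hpos =>
              intro _
              rw [hC''i]; omega
            case h4 =>
              intro k hk1 hk2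
              rw [getD_set_ne counts j2 k _ (by omega)]
              exact hzz k hk1 hk2
            case hmu =>
              rw [hstate'']
              rw [show stateL chars counts (i+1) =
                  ((-(((chars.getD j2 (Char.ofNat 0)).toNat : Int))), counts.getD j2 0) :: stateL chars counts (j2+1) from by
                rw [hrest, hconsj2]] at hmu
              by_cases hc21 : 1 < counts.getD j2 0
              · rw [if_pos hc21]
                simp only [muF, tailWt, List.length_cons, List.drop_one, List.tail_cons,
                  List.map_cons, List.sum_cons] at hmu ⊢
                omega
              · rw [if_neg hc21]
                simp only [muF, tailWt, List.length_cons, List.drop_one, List.tail_cons,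
                  List.map_cons, List.sum_cons] at hmu ⊢
                omega
            rw [hstate'']
            simp [repC, Char.ofNat_toNat, Int.toNat_of_nonpos hlimnp, List.append_assoc]

      · -- whole head consumed (counts[i] <= limit): advance i
        rw [if_neg hcl]
        have hlim : 0 < limit := by omega
        have htake : min (counts.getD i 0) limit = counts.getD i 0 := by omega
        simp only [loopB]
        rw [if_pos hi, htake, if_pos (by omega : counts.getD i 0 > 0),
          getD_set_self counts i _ (by omega), if_pos (by omega : counts.getD i 0 - counts.getD i 0 = 0)]
        rw [show counts.getD i 0 - counts.getD i 0 = 0 from by omega]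
        have hz := skipZeros_zero (counts.set i 0) chars.length (i+1)
        set i' := skipZeros (counts.set i 0) chars.length (i+1) with hi'
        have hge : i + 1 ≤ i' := skipZeros_ge _ _ _
        have hcongr : stateL chars (counts.set i 0) (i+1) = stateL chars counts (i+1) :=
          stateL_congr chars _ counts (i+1) (fun k hk => getD_set_ne counts i k 0 (by omega))
        have hstate : stateL chars (counts.set i 0) i' = stateL chars counts (i+1) := by
          rw [← stateL_eq_of_zeros chars (counts.set i 0) (i+1) i' hge (fun k h1 h2 => hz k h1 h2),
            hcongr]
        rw [ih i' j (counts.set i 0) _ (by simp [hlen]) ?hnn ?hpos ?h4 ?hmu]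
        case hnn =>
          intro k hk
          by_cases hki : k = i
          · subst hki; omega
          · rw [getD_set_ne counts i k 0 (by omega)]
            exact hnn k (by omega)
        case hpos =>
          intro hlt
          have hne := skipZeros_stop2 (counts.set i 0) chars.length (i+1) (by rw [← hi']; exact hlt)
          rw [← hi'] at hne
          have : 0 ≤ (counts.set i 0).getD i' 0 := by
            rw [getD_set_ne counts i i' 0 (by omega)]
            exact hnn i' (by omega)
          omega
        case h4 =>
          intro k hk1 hk2
          rw [getD_set_ne counts i k 0 (by omega)]
          exact h4 k (by omega) hk2
        case hmu =>
          rw [hstate]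
          have h1 := tailWt_le ((-(((chars.getD i (Char.ofNat 0)).toNat : Int))), counts.getD i 0)
            (stateL chars counts (i+1))
          simp only [muF, List.length_cons] at hmu ⊢
          omega
        rw [hstate, if_pos (show counts.getD i 0 > 0 from by omega)]
        simp [repC, Char.ofNat_toNat, List.append_assoc]

lemma pvCounterBuild (cs : List Char) :
    cs.foldl (fun d s => if (d.get? s).isNone then d.insert s 1 else d.insert s (d.getD s 0 + 1))
      (PySem.Dict.empty : PySem.Dict Char Int) = PySem.Dict.counter cs := by
  rw [← PySem.Dict.foldl_insert_getD_add_one_eq_counter]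
  congr 1
  funext d s
  by_cases h : (d.get? s).isNone
  · rw [if_pos h, PySem.Dict.getD_of_get?_eq_none (h := Option.isNone_iff_eq_none.mp h)]
    norm_num
  · rw [if_neg h]

lemma pvIntercalateNil (xss : List (List Char)) : List.intercalate ([] : List Char) xss = xss.flatten := by
  induction xss with
  | nil => simp [List.intercalate]
  | cons a t ih =>
    cases t with
    | nil => simp [List.intercalate]
    | cons b t2 =>
      simp [List.intercalate, List.intersperse] at ih ⊢
      exact ih

lemma stateL_map (chars : List Char) (f : Char → Int) (hf : ∀ c ∈ chars, 0 < f c) :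
    ∀ i, stateL chars (chars.map f) i = (chars.drop i).map (fun c => (-(c.toNat : Int), f c)) := by
  intro i
  induction hn : chars.length - i generalizing i with
  | zero =>
    rw [stateL_nil chars _ i (by omega), List.drop_eq_nil_of_le (by omega)]
    simp
  | succ m ih =>
    have hi : i < chars.length := by omega
    have hget : (chars.map f).getD i 0 = f chars[i] := by
      simp [List.getD, List.getElem?_map, hi]
    have hgetc : chars.getD i (Char.ofNat 0) = chars[i] := by
      simp [List.getD, hi]
    rw [stateL_cons chars _ i hi (by rw [hget]; exact hf _ (chars.getElem_mem hi)),
      hget, hgetc, ih (i+1) (by omega)]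
    conv_rhs => rw [List.drop_eq_getElem_cons hi]
    simp
    rw [List.drop_eq_getElem_cons (show i < (List.map (fun c => ((-(c.toNat : Int)), f c)) chars).length from by simpa using hi)]
    simp [hi]

theorem pv_main (label : String) (limit : Int) (hdom : Dom_find_biggest_string label limit) :
    find_biggest_string label limit = find_biggest_string_alt label limit := by
  apply String.toList_inj.mp
  have hdomc : ∀ c ∈ label.toList, 9 ≤ c.toNat := by
    intro c hc
    have : pvDomChar c = true := by
      unfold Dom_find_biggest_string at hdom
      simp [pvDomStr, List.all_eq_true] at hdom
      exact hdom.1 c hc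
    simp [pvDomChar] at this
    omega
  set chars := PySem.List.sorted (PySem.Set.ofList label.toList) (fun c => c) true with hchars
  set l0 := chars.map (fun c => (-(c.toNat : Int), (label.toList.count c : Int))) with hl0
  have hchp : chars.Perm (PySem.Set.ofList label.toList) := PySem.List.sorted_perm _ _ _
  have hnodup : chars.Nodup := hchp.nodup_iff.mpr (PySem.Set.nodup_ofList label.toList)
  have hmemcs : ∀ c ∈ chars, c ∈ label.toList := by
    intro c hc
    exact (PySem.Set.mem_ofList _ _).mp (hchp.mem_iff.mp hc)
  have hstrict : chars.Pairwise (fun a b => b < a) := by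
    have h1 : chars.Pairwise (fun a b : Char => b ≤ a) := by
      have := PySem.List.sorted_pairwise_rev (PySem.Set.ofList label.toList) (fun c : Char => c)
      simpa using this
    exact (h1.and hnodup).imp (fun {a b} h => lt_of_le_of_ne h.1 (Ne.symm h.2))
  have hsort0 : l0.Pairwise (fun a b => a.1 < b.1) := by
    rw [hl0, List.pairwise_map]
    refine hstrict.imp ?_
    intro a b hba
    have : b.toNat < a.toNat := Nat.lt_of_succ_le hba
    simp
    omega
  have hpos0 : ∀ x ∈ l0, 1 ≤ x.2 := by
    intro x hx
    rw [hl0, List.mem_map] at hx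
    obtain ⟨c, hc, rfl⟩ := hx
    have : 0 < label.toList.count c := List.count_pos_iff.mpr (hmemcs c hc)
    simp only []
    exact_mod_cast this
  have hpb0 : pbOf l0 0 = false := by
    rw [hl0]
    cases hch : chars with
    | nil => rfl
    | cons c t =>
      have h9 : 9 ≤ c.toNat := hdomc c (hmemcs c (by rw [hch]; simp))
      simp [pbOf]
      omega
  -- A side
  have hA : (find_biggest_string label limit).toList = refLoop limit l0 false := by
    simp only [find_biggest_string, pvCounterBuild, PySem.List.foldl_append_singleton_eq_map,
      PySem.Dict.items_counter, List.nil_append, List.map_map]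
    have hq0 : ((PySem.Set.ofList label.toList).map
        ((fun p : Char × Int => (-(p.1.toNat : Int), p.2)) ∘ (fun k => (k, (label.toList.count k : Int))))).Perm l0 := by
      rw [hl0]
      exact (hchp.map _).symm
    rw [loopA_eq limit _ l0 _ 0 "" hq0 hsort0 hpos0 ?hfuel, hpb0]
    · simp
    case hfuel =>
      rw [hpb0]
      have hsum := (hq0.map (fun p => p.2.toNat)).sum_eq
      rw [List.map_map] at hsum
      have hlen := hq0.length_eq
      rw [List.length_map] at hlen
      have htw := tailWt_le_sum l0
      simp only [muF]
      norm_num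
      simp only [Function.comp_def] at hsum ⊢
      omega
  -- B side
  have hB : (find_biggest_string_alt label limit).toList = refLoop limit l0 false := by
    simp only [find_biggest_string_alt, PySem.Dict.foldl_insert_getD_add_one_eq_counter,
      PySem.Dict.keys_counter, PySem.Dict.getD_counter]
    rw [PySem.Str.toList_join]
    have hjoin : ∀ parts : List (List Char), PySem.Chars.join "".toList parts = parts.flatten := by
      intro parts
      have : ("" : String).toList = [] := by rfl
      rw [this]
      simp only [PySem.Chars.join]
      exact pvIntercalateNil parts
    rw [hjoin]
    have hposf : ∀ c ∈ chars, 0 < ((label.toList.count c : Int)) := by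
      intro c hc
      exact_mod_cast List.count_pos_iff.mpr (hmemcs c hc)
    have hstate0 : stateL chars (chars.map (fun c => ((label.toList.count c : Int)))) 0 = l0 := by
      rw [stateL_map chars _ hposf 0, List.drop_zero, hl0]
    have hcounts : ∀ k, 0 ≤ (chars.map (fun c => ((label.toList.count c : Int)))).getD k 0 := by
      intro k
      rcases Nat.lt_or_ge k chars.length with hk | hk
      · simp [List.getD, List.getElem?_map, hk]
      · simp [List.getD, List.getElem?_eq_none (by simpa using hk : (chars.map (fun c => ((label.toList.count c : Int)))).length ≤ k)]
    rw [loopB_eq chars limit _ 0 1 (chars.map (fun c => ((label.toList.count c : Int)))) []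
      (by simp) (fun k _ => hcounts k) ?hposB (by omega) ?hmuB]
    · rw [hstate0]
      simp
    case hposB =>
      intro h0
      have h1 := hposf (chars[0]'h0) (chars.getElem_mem h0)
      have h2 : (chars.map (fun c => ((label.toList.count c : Int)))).getD 0 0 =
          (label.toList.count (chars[0]'h0) : Int) := by
        simp [List.getD, List.getElem?_map, List.getElem?_eq_getElem h0]
      rw [h2]
      omega
    case hmuB =>
      rw [hstate0]
      have hmm : ((chars.map (fun c => ((label.toList.count c : Int)))).map Int.toNat) =
          (l0.map (fun p => p.2.toNat)) := by
        rw [hl0]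
        simp [List.map_map, Function.comp]
      have htw := tailWt_le_sum l0
      have hlenl0 : l0.length = chars.length := by rw [hl0]; simp
      have hlc := hchp.length_eq
      simp only [muF]
      rw [hmm]
      norm_num
      omega
  rw [hA, hB]

-- ===== VERDICT (by name: the statement is the Claim_ definition above) =====
theorem find_biggest_string_spec : Claim_equal_find_biggest_string := by
  intro label limit hdom
  exact pv_main label limit hdom
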